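-- pv_equiv track=rewrite | github.com/RhythrosaLabs/autonomous-business-platform | workflow_converter.py | _map_pipedream_type
-- ===== SOURCE A (Python) =====
-- from typing import Dict, List, Tuple, Optional, Any
--
-- def _map_pipedream_type(step: Dict) -> str:
--     """Map Pipedream step types"""
--     namespace = step.get("namespace", "").lower()
--
--     if "http" in namespace:
--         return "api_request"
--     elif "code" in namespace or step.get("code"):
--         return "code"
--     elif any(x in namespace for x in ["slack", "discord", "twitter"]):
--         return "social_media"
--     elif "openai" in namespace:
--         return "ai_generate"
--     elif any(x in namespace for x in ["google", "sheets", "drive"]):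
--         return "google_integration"
--     elif "email" in namespace:
--         return "email"
--
--     return "action"
-- ===== SOURCE B (Python) =====
-- _KEYWORDS = [
--     ("http", 0, "api_request"),
--     ("code", 1, "code"),
--     ("slack", 2, "social_media"),
--     ("discord", 2, "social_media"),
--     ("twitter", 2, "social_media"),
--     ("openai", 3, "ai_generate"),
--     ("google", 4, "google_integration"),
--     ("sheets", 4, "google_integration"),
--     ("drive", 4, "google_integration"),
--     ("email", 5, "email"),
-- ]
--
--
-- def _map_pipedream_type(step):
--     """Classify by collecting ALL matching keyword rules as (rank, category)
--     pairs, then taking the best-ranked (minimum-rank) match.  Correct because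
--     any two keywords sharing a rank carry the same category, so the minimum
--     rank names exactly the category the highest-precedence match would."""
--     namespace = step.get("namespace", "").lower()
--     candidates = [(rank, cat) for kw, rank, cat in _KEYWORDS if kw in namespace]
--     if step.get("code"):
--         candidates.append((1, "code"))
--     return min(candidates, key=lambda t: t[0], default=(6, "action"))[1]
-- ===== Notes on version B (the rewrite author's own statement) =====
-- stated objective: alternative
-- what changed: Instead of a short-circuiting if-elif ladder, B collects ALL keyword matches as (rank, category) pairs from a flat keyword table (plus a rank-1 pair when the step's code field is truthy) and returns the category of the minimum-rank pair, with a fallback category when nothing matches.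
import Mathlib
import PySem

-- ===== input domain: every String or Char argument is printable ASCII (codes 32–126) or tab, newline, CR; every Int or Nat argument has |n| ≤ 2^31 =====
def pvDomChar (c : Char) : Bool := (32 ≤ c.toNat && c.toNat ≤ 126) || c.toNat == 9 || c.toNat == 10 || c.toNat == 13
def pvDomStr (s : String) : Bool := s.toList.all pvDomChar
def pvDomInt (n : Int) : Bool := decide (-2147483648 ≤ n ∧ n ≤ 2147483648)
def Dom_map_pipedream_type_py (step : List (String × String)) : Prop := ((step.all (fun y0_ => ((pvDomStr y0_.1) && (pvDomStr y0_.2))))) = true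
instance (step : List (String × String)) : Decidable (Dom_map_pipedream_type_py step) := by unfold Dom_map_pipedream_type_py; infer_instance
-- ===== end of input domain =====

-- B collects ALL matching keyword rules as (rank, category) pairs and returns the category of the minimum-rank match, instead of A's short-circuit if-elif ladder (alternative; same cost).
-- ===== PORT A =====
def map_pipedream_type_py (step : List (String × String)) : String :=
  let ns := PySem.Str.lower (PySem.Dict.getD (PySem.Dict.mk step) "namespace" "")
  if PySem.Str.isIn "http" ns then "api_request"
  else if PySem.Str.isIn "code" ns || !(PySem.Dict.getD (PySem.Dict.mk step) "code" "" == "") then "code"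
  else if ["slack", "discord", "twitter"].any (fun x => PySem.Str.isIn x ns) then "social_media"
  else if PySem.Str.isIn "openai" ns then "ai_generate"
  else if ["google", "sheets", "drive"].any (fun x => PySem.Str.isIn x ns) then "google_integration"
  else if PySem.Str.isIn "email" ns then "email"
  else "action"

-- ===== PORT B =====
-- Source B's flat keyword table _KEYWORDS
def pvKeywords : List (String × Int × String) :=
  [("http", 0, "api_request"),
   ("code", 1, "code"),
   ("slack", 2, "social_media"),
   ("discord", 2, "social_media"),
   ("twitter", 2, "social_media"),
   ("openai", 3, "ai_generate"),
   ("google", 4, "google_integration"),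
   ("sheets", 4, "google_integration"),
   ("drive", 4, "google_integration"),
   ("email", 5, "email")]

-- min(candidates, key=lambda t: t[0], default=(6, "action")) is PySem.List.min? with the default via getD
def map_pipedream_type_py_alt (step : List (String × String)) : String :=
  let ns := PySem.Str.lower (PySem.Dict.getD (PySem.Dict.mk step) "namespace" "")
  let candidates := (pvKeywords.filter (fun t => PySem.Str.isIn t.1 ns)).map (fun t => t.2)
  let candidates := if !(PySem.Dict.getD (PySem.Dict.mk step) "code" "" == "") then candidates ++ [((1 : Int), "code")] else candidates
  ((PySem.List.min? candidates (fun t => t.1)).getD ((6 : Int), "action")).2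

-- ===== PRECONDITION & SPEC =====
def Spec_map_pipedream_type_py (step : List (String × String)) (out : String) : Prop := out = map_pipedream_type_py_alt step
instance (step : List (String × String)) (out : String) : Decidable (Spec_map_pipedream_type_py step out) := by unfold Spec_map_pipedream_type_py; infer_instance

-- ===== CLAIM (what is proved, stated in full; the proofs are below) =====
def Claim_equal_map_pipedream_type_py : Prop := ∀ (step : List (String × String)), Dom_map_pipedream_type_py step → Spec_map_pipedream_type_py step (map_pipedream_type_py step)

-- ===== LEMMAS AND PROOFS =====

-- proof-only: the candidate list as a function of the ten membership booleans
def pvCand (b1 b2 b3 b4 b5 b6 b7 b8 b9 b10 : Bool) : List (Int × String) :=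
  (if b1 then [((0 : Int), "api_request")] else []) ++
  ((if b2 then [((1 : Int), "code")] else []) ++
  ((if b3 then [((2 : Int), "social_media")] else []) ++
  ((if b4 then [((2 : Int), "social_media")] else []) ++
  ((if b5 then [((2 : Int), "social_media")] else []) ++
  ((if b6 then [((3 : Int), "ai_generate")] else []) ++
  ((if b7 then [((4 : Int), "google_integration")] else []) ++
  ((if b8 then [((4 : Int), "google_integration")] else []) ++
  ((if b9 then [((4 : Int), "google_integration")] else []) ++
  (if b10 then [((5 : Int), "email")] else [])))))))))

theorem pvFMCons {α β : Type} (p : α → Bool) (f : α → β) (a : α) (l : List α) :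
    List.map f (List.filter p (a :: l)) =
      (if p a then [f a] else []) ++ List.map f (List.filter p l) := by
  cases h : p a <;> simp [h]

theorem pvFilterBridge (p : String × Int × String → Bool) :
    (pvKeywords.filter p).map (fun t => t.2) =
      pvCand (p ("http", 0, "api_request")) (p ("code", 1, "code"))
        (p ("slack", 2, "social_media")) (p ("discord", 2, "social_media"))
        (p ("twitter", 2, "social_media")) (p ("openai", 3, "ai_generate"))
        (p ("google", 4, "google_integration")) (p ("sheets", 4, "google_integration"))
        (p ("drive", 4, "google_integration")) (p ("email", 5, "email")) := by
  simp only [pvKeywords, pvCand, pvFMCons, List.filter_nil, List.map_nil, List.append_nil]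

theorem pvLadderMin : ∀ (b1 b2 b3 b4 b5 b6 b7 b8 b9 b10 bc : Bool),
    (if b1 then "api_request"
     else if b2 || bc then "code"
     else if b3 || (b4 || b5) then "social_media"
     else if b6 then "ai_generate"
     else if b7 || (b8 || b9) then "google_integration"
     else if b10 then "email"
     else "action")
    = ((PySem.List.min?
          (if bc then pvCand b1 b2 b3 b4 b5 b6 b7 b8 b9 b10 ++ [((1 : Int), "code")]
           else pvCand b1 b2 b3 b4 b5 b6 b7 b8 b9 b10) (fun t => t.1)).getD
        ((6 : Int), "action")).2 := by
  decide

-- ===== VERDICT (by name: the statement is the Claim_ definition above) =====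
theorem map_pipedream_type_py_spec : Claim_equal_map_pipedream_type_py := by
  intro step _
  unfold Spec_map_pipedream_type_py map_pipedream_type_py map_pipedream_type_py_alt
  simp only [List.any_cons, List.any_nil, Bool.or_false]
  rw [pvFilterBridge]
  exact pvLadderMin _ _ _ _ _ _ _ _ _ _ _
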